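-- pv_equiv track=rewrite | github.com/HoneybeeSJ/Cote | 프로그래머스/0/181932. 코드 처리하기/코드 처리하기.py | solution
-- ===== SOURCE A (Python) =====
-- def solution(code):
--     mode = 0  # 초기 모드 설정
--     ret = ""  # 결과 문자열
--
--     for idx in range(len(code)):
--         if mode == 0:  # mode가 0일 때
--             if code[idx] == "1":
--                 mode = 1  # 모드 전환
--             elif idx % 2 == 0:  # 짝수 인덱스일 때만
--                 ret += code[idx]
--         else:  # mode가 1일 때
--             if code[idx] == "1":
--                 mode = 0  # 모드 전환
--             elif idx % 2 == 1:  # 홀수 인덱스일 때만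
--                 ret += code[idx]
--
--     return ret if ret else "EMPTY"  # 결과 반환
-- ===== SOURCE B (Python) =====
-- def solution(code):
--     # pass 1: par[i] = parity of the number of "1"s strictly before index i
--     par = []
--     ones = 0
--     for ch in code:
--         par.append(ones % 2)
--         if ch == "1":
--             ones += 1
--     # pass 2: keep code[i] iff it is not "1" and i's parity matches the mode there
--     picked = "".join(c for i, c in enumerate(code) if c != "1" and i % 2 == par[i])
--     return picked if picked else "EMPTY"
-- ===== Notes on version B (the rewrite author's own statement) =====
-- stated objective: alternative
-- what changed: Replaces A's single stateful mode-toggling loop by two passes: first a prefix-parity table of the count of '1's before each index, then a filtering comprehension keeping code[i] iff code[i] != '1' and i % 2 equals that parity.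
import Mathlib
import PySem

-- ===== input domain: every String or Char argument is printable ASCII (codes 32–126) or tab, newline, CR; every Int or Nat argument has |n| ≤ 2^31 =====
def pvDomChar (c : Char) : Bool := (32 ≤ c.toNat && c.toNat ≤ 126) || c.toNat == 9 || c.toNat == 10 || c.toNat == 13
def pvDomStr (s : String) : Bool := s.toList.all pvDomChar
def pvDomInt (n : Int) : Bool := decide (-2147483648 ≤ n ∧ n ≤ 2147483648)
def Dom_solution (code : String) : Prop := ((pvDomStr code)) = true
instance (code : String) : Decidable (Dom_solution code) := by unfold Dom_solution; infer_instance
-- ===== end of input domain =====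

-- B replaces A's single mode-toggling loop by a prefix-parity table pass plus a filtering pass (alternative decomposition, same O(n) cost).

-- ===== PORT A =====
-- shared helper: 'for idx in range(len(code))' together with 'code[idx]' is ported as
-- enumeration of the character list with its (always in-range) index.
def enumFrom {α : Type} (n : Nat) : List α → List (Nat × α)
  | [] => []
  | c :: cs => (n, c) :: enumFrom (n + 1) cs

-- one iteration of A's loop body on state (mode, ret)
def solAStep (st : Int × List Char) (p : Nat × Char) : Int × List Char :=
  if st.1 = 0 then
    if p.2 = '1' then (1, st.2)
    else if p.1 % 2 = 0 then (st.1, st.2 ++ [p.2])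
    else st
  else
    if p.2 = '1' then (0, st.2)
    else if p.1 % 2 = 1 then (st.1, st.2 ++ [p.2])
    else st

def solution (code : String) : String :=
  let st := (enumFrom 0 code.toList).foldl solAStep (0, [])
  if st.2 = [] then "EMPTY" else String.mk st.2

-- ===== PORT B =====
-- pass 1 of B: fold building (ones, par) — par gets ones % 2 appended, then ones is bumped on '1'
def parStep (st : Nat × List Nat) (ch : Char) : Nat × List Nat :=
  (st.1 + (if ch = '1' then 1 else 0), st.2 ++ [st.1 % 2])

def solution_alt (code : String) : String :=
  let cs := code.toList
  let par := (cs.foldl parStep (0, [])).2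
  let picked := (enumFrom 0 cs).filterMap
    (fun p => if p.2 ≠ '1' ∧ p.1 % 2 = par.getD p.1 0 then some p.2 else none)
  if picked = [] then "EMPTY" else String.mk picked

-- ===== PRECONDITION & SPEC =====
def Spec_solution (code : String) (out : String) : Prop := out = solution_alt code
instance (code : String) (out : String) : Decidable (Spec_solution code out) := by unfold Spec_solution; infer_instance

-- ===== CLAIM (what is proved, stated in full; the proofs are below) =====
def Claim_equal_solution : Prop := ∀ (code : String), Dom_solution code → Spec_solution code (solution code)

-- ===== LEMMAS AND PROOFS =====

-- reference selection: chars kept from cs, whose first char has absolute index n,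
-- with k = number of '1's strictly before it
def pick (n k : Nat) : List Char → List Char
  | [] => []
  | c :: cs =>
    if c = '1' then pick (n + 1) (k + 1) cs
    else if n % 2 = k % 2 then c :: pick (n + 1) k cs
    else pick (n + 1) k cs

-- parity list produced by B's first pass, starting from ones-count k
def parFrom (k : Nat) : List Char → List Nat
  | [] => []
  | c :: cs => k % 2 :: parFrom (k + (if c = '1' then 1 else 0)) cs

theorem parStep_foldl (cs : List Char) : ∀ (k : Nat) (pre : List Nat),
    (cs.foldl parStep (k, pre)).2 = pre ++ parFrom k cs := by
  induction cs with
  | nil => intro k pre; simp [parFrom]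
  | cons c cs ih =>
    intro k pre
    simp only [List.foldl_cons, parStep, parFrom, ih]
    simp

theorem Bside (cs : List Char) : ∀ (n k : Nat) (pre : List Nat), pre.length = n →
    (enumFrom n cs).filterMap
      (fun p => if p.2 ≠ '1' ∧ p.1 % 2 = (pre ++ parFrom k cs).getD p.1 0 then some p.2 else none)
    = pick n k cs := by
  induction cs with
  | nil => intro n k pre _; simp [enumFrom, pick]
  | cons c cs ih =>
    intro n k pre hlen
    have hget : (pre ++ parFrom k (c :: cs)).getD n 0 = k % 2 := by
      simp [List.getD_eq_getElem?_getD, List.getElem?_append_right, hlen.symm.le, hlen, parFrom]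
    have hrest : ∀ (p : Nat × Char), p ∈ enumFrom (n + 1) cs →
        (pre ++ parFrom k (c :: cs)).getD p.1 0
        = ((pre ++ [k % 2]) ++ parFrom (k + (if c = '1' then 1 else 0)) cs).getD p.1 0 := by
      intro p _
      simp [parFrom, List.append_assoc]
    have htail : ∀ (k' : Nat),
        (enumFrom (n + 1) cs).filterMap
          (fun p => if p.2 ≠ '1' ∧ p.1 % 2 = ((pre ++ [k % 2]) ++ parFrom k' cs).getD p.1 0 then some p.2 else none)
        = pick (n + 1) k' cs := by
      intro k'
      exact ih (n + 1) k' (pre ++ [k % 2]) (by simp [hlen])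
    simp only [enumFrom, List.filterMap_cons, pick]
    have hcong : (enumFrom (n + 1) cs).filterMap
          (fun p => if p.2 ≠ '1' ∧ p.1 % 2 = (pre ++ parFrom k (c :: cs)).getD p.1 0 then some p.2 else none)
        = (enumFrom (n + 1) cs).filterMap
          (fun p => if p.2 ≠ '1' ∧ p.1 % 2 = ((pre ++ [k % 2]) ++ parFrom (k + (if c = '1' then 1 else 0)) cs).getD p.1 0 then some p.2 else none) := by
      apply List.filterMap_congr
      intro p hp
      rw [hrest p hp]
    by_cases hc : c = '1'
    · subst hc
      simp only [hget]
      rw [if_neg (by simp), hcong, htail]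
      simp
    · by_cases hpar : n % 2 = k % 2
      · rw [hget, if_pos ⟨hc, hpar⟩, hcong, htail]
        simp [hc, hpar]
      · rw [hget, if_neg (by simp [hpar]), hcong, htail]
        simp [hc, hpar]

theorem Aside (cs : List Char) : ∀ (n k : Nat) (acc : List Char),
    ((enumFrom n cs).foldl solAStep ((k % 2 : Nat), acc)).2 = acc ++ pick n k cs := by
  induction cs with
  | nil => intro n k acc; simp [enumFrom, pick]
  | cons c cs ih =>
    intro n k acc
    simp only [enumFrom, List.foldl_cons, pick]
    by_cases hk : k % 2 = 0
    · by_cases hc : c = '1'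
      · subst hc
        rw [show solAStep ((k % 2 : Nat), acc) (n, '1') = ((((k + 1) % 2 : Nat) : Int), acc) by
          simp [solAStep, hk]; omega, ih]
        simp
      · by_cases hn : n % 2 = 0
        · rw [show solAStep ((k % 2 : Nat), acc) (n, c) = (((k % 2 : Nat) : Int), acc ++ [c]) by
            simp [solAStep, hk, hc, hn], ih]
          simp [hc, hk, hn]
        · rw [show solAStep ((k % 2 : Nat), acc) (n, c) = (((k % 2 : Nat) : Int), acc) by
            simp [solAStep, hk, hc, hn], ih]
          have : ¬ n % 2 = k % 2 := by omega
          simp [hc, this]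
    · have hk1 : k % 2 = 1 := by omega
      by_cases hc : c = '1'
      · subst hc
        rw [show solAStep ((k % 2 : Nat), acc) (n, '1') = ((((k + 1) % 2 : Nat) : Int), acc) by
          simp [solAStep, hk1, hk]; omega, ih]
        simp
      · by_cases hn : n % 2 = 1
        · rw [show solAStep ((k % 2 : Nat), acc) (n, c) = (((k % 2 : Nat) : Int), acc ++ [c]) by
            simp [solAStep, hk1, hc, hn], ih]
          simp [hc, hk1, hn]
        · rw [show solAStep ((k % 2 : Nat), acc) (n, c) = (((k % 2 : Nat) : Int), acc) by
            simp [solAStep, hk1, hc, hn], ih]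
          have : ¬ n % 2 = k % 2 := by omega
          simp [hc, this]

-- ===== VERDICT (by name: the statement is the Claim_ definition above) =====
theorem solution_spec : Claim_equal_solution := by
  intro code _
  unfold Spec_solution solution solution_alt
  have hA : ((enumFrom 0 code.toList).foldl solAStep (0, [])).2 = pick 0 0 code.toList := by
    have := Aside code.toList 0 0 []
    simpa using this
  have hB : (enumFrom 0 code.toList).filterMap
        (fun p => if p.2 ≠ '1' ∧ p.1 % 2 = ((code.toList.foldl parStep (0, [])).2).getD p.1 0 then some p.2 else none)
      = pick 0 0 code.toList := by
    rw [parStep_foldl]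
    exact Bside code.toList 0 0 [] rfl
  simp only [hA, hB]
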